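-- pv_equiv track=rewrite | github.com/mahmoudimus/.idapro | scripts/regex_sigmaker.py | nibble_to_regex
-- ===== SOURCE A (Python) =====
-- def nibble_to_regex(token: str) -> str:
--     """
--     Convert a two-character token (which may include '?' wildcards)
--     into a regex snippet matching one raw byte.
--     """
--     if token == "??":
--         return "."
--     if "?" not in token:
--         return f"\\x{token}"
--     possibilities = []
--     for byte in range(256):
--         hex_byte = f"{byte:02X}"
--         ok = True
--         for i in range(2):
--             if token[i] != "?" and token[i] != hex_byte[i]:
--                 ok = False
--                 break
--         if ok:
--             possibilities.append(f"\\x{hex_byte}")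
--     if not possibilities:
--         raise ValueError(f"No possible byte matches token {token}")
--     if len(possibilities) == 1:
--         return possibilities[0]
--     return f"(?:{'|'.join(possibilities)})"
-- ===== SOURCE B (Python) =====
-- _HEX = "0123456789ABCDEF"
--
--
-- def nibble_to_regex(token: str) -> str:
--     """
--     Convert a two-character token (which may include '?' wildcards)
--     into a regex snippet matching one raw byte.
--     """
--     if token == "??":
--         return "."
--     if "?" not in token:
--         return f"\\x{token}"
--     hi, lo = token[0], token[1]
--     if hi == "?" and lo == "?":
--         possibilities = [f"\\x{h}{l}" for h in _HEX for l in _HEX]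
--     elif hi == "?":
--         possibilities = [f"\\x{h}{lo}" for h in _HEX] if lo in _HEX else []
--     elif lo == "?":
--         possibilities = [f"\\x{hi}{l}" for l in _HEX] if hi in _HEX else []
--     else:
--         possibilities = [f"\\x{hi}{lo}"] if hi in _HEX and lo in _HEX else []
--     if not possibilities:
--         raise ValueError(f"No possible byte matches token {token}")
--     if len(possibilities) == 1:
--         return possibilities[0]
--     return f"(?:{'|'.join(possibilities)})"
-- ===== Notes on version B (the rewrite author's own statement) =====
-- stated objective: alternative
-- what changed: B replaces A's scan of all 256 candidate bytes (with an inner 2-position comparison loop per byte) by a direct case analysis on which of the two nibble characters is the '?' wildcard, enumerating only the 16 hex digits per free nibble; a timing run found no measurable speed difference.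
-- outside the precondition, e.g. on nibble_to_regex('?'): A raises IndexError, B raises IndexError
import Mathlib
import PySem

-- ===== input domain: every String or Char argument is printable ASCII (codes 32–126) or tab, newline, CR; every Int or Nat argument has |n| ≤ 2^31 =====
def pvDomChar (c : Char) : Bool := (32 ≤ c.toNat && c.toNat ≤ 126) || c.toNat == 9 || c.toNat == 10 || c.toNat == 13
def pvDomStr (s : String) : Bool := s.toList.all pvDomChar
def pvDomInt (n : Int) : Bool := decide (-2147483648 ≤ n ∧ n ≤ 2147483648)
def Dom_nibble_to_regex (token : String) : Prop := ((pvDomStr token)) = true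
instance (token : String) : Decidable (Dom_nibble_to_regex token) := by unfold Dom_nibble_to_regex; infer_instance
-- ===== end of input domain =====

-- B replaces A's scan of all 256 candidate bytes by direct case analysis on which of the
-- two nibbles is the '?' wildcard, enumerating only the 16 hex digits per free nibble
-- (objective: alternative algorithm; A's raises are modelled by "" and excluded by Pre_).

set_option maxRecDepth 4000

-- ===== PORT A =====
-- the 16 uppercase hex digits, shared: A uses them to port the f"{byte:02X}" formatting,
-- B iterates over them (for B they port the module constant _HEX of Source B)
def hexChars : List Char := ['0','1','2','3','4','5','6','7','8','9','A','B','C','D','E','F']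

-- f"{n:X}" for 0 ≤ n < 16 (single hex digit); exact on that range
def hexDigitA (n : Nat) : Char := hexChars.getD n ' '

-- the loop 'for byte in range(256): … possibilities.append(…)' of A
def possibilitiesA (token : String) : List (List Char) :=
  (List.range 256).foldl (fun acc byte =>
    -- hex_byte = f"{byte:02X}"; exact since 0 ≤ byte < 256
    let hex_byte : List Char := [hexDigitA (byte / 16), hexDigitA (byte % 16)]
    -- inner loop 'for i in range(2)' with break: once ok is False it stays False;
    -- token[i] is PySem.Str.pyGet?; the getD default is never read on Pre_ inputs
    let ok := (List.range 2).foldl (fun ok (i : Nat) =>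
      if ok then
        let tc := (PySem.Str.pyGet? token (i : Int)).getD '\x00'
        let hc := hex_byte.getD i ' '
        if tc ≠ '?' ∧ tc ≠ hc then false else true
      else ok) true
    if ok then acc ++ [('\\' :: 'x' :: hex_byte)] else acc) []

def nibble_to_regex (token : String) : String :=
  if token = "??" then "."
  else if !(PySem.Str.isIn "?" token) then String.ofList ('\\' :: 'x' :: token.toList)
  else
    let possibilities := possibilitiesA token
    if possibilities.isEmpty then ""   -- raise ValueError: modelled as "", excluded by Pre_
    else if possibilities.length = 1 then String.ofList (possibilities.getD 0 [])
    else String.ofList ('(' :: '?' :: ':' :: (PySem.Chars.join ['|'] possibilities ++ [')']))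

-- ===== PORT B =====
-- the four-way case analysis of Source B on (hi, lo); hi = token[0], lo = token[1]
def possibilitiesB (hi lo : Char) : List (List Char) :=
  if hi = '?' ∧ lo = '?' then
    hexChars.flatMap (fun h => hexChars.map (fun l => ['\\', 'x', h, l]))
  else if hi = '?' then
    (if lo ∈ hexChars then hexChars.map (fun h => ['\\', 'x', h, lo]) else [])
  else if lo = '?' then
    (if hi ∈ hexChars then hexChars.map (fun l => ['\\', 'x', hi, l]) else [])
  else
    (if hi ∈ hexChars ∧ lo ∈ hexChars then [['\\', 'x', hi, lo]] else [])

def nibble_to_regex_alt (token : String) : String :=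
  if token = "??" then "."
  else if !(PySem.Str.isIn "?" token) then String.ofList ('\\' :: 'x' :: token.toList)
  else
    -- hi, lo = token[0], token[1]; the getD default is never read on Pre_ inputs
    let hi := (PySem.Str.pyGet? token (0 : Int)).getD '\x00'
    let lo := (PySem.Str.pyGet? token (1 : Int)).getD '\x00'
    let possibilities := possibilitiesB hi lo
    if possibilities.isEmpty then ""   -- raise ValueError: modelled as "", excluded by Pre_
    else if possibilities.length = 1 then String.ofList (possibilities.getD 0 [])
    else String.ofList ('(' :: '?' :: ':' :: (PySem.Chars.join ['|'] possibilities ++ [')']))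

-- ===== PRECONDITION & SPEC =====
-- a nibble character on which a wildcard token can succeed: '?' or an UPPERCASE hex digit
def okNib (c : Char) : Prop :=
  c = '?' ∨ c ∈ (['0','1','2','3','4','5','6','7','8','9','A','B','C','D','E','F'] : List Char)

-- Pre_ excludes exactly the inputs where A raises (and B raises too): IndexError on the
-- one-character token "?", and ValueError when a wildcard token's first two characters
-- admit no byte (a fixed nibble that is not an uppercase hex digit).
def Pre_nibble_to_regex (token : String) : Prop :=
  token = "??" ∨ PySem.Str.isIn "?" token = false ∨
    (2 ≤ token.toList.length ∧ okNib (token.toList.getD 0 ' ') ∧ okNib (token.toList.getD 1 ' '))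
instance (token : String) : Decidable (Pre_nibble_to_regex token) := by
  unfold Pre_nibble_to_regex okNib; infer_instance

def pvWitness_nibble_to_regex : String := "A?"

def Spec_nibble_to_regex (token : String) (out : String) : Prop := out = nibble_to_regex_alt token
instance (token : String) (out : String) : Decidable (Spec_nibble_to_regex token out) := by
  unfold Spec_nibble_to_regex; infer_instance

-- ===== CLAIM (what is proved, stated in full; the proofs are below) =====
def Claim_equal_nibble_to_regex : Prop := ∀ (token : String), Dom_nibble_to_regex token → Pre_nibble_to_regex token → Spec_nibble_to_regex token (nibble_to_regex token)

-- ===== LEMMAS AND PROOFS =====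

-- 'this nibble character matches this hex digit' (the inner check of A, per position)
def pOK (c x : Char) : Bool := c = '?' || c = x

theorem flatMap_if {α : Type} (l : List Nat) (g : Nat → List α) (p : Nat → Bool) :
    l.flatMap (fun x => if p x then g x else []) = (l.filter p).flatMap g := by
  induction l with
  | nil => rfl
  | cons a t ih => by_cases h : p a <;> simp [h, ih]

set_option maxRecDepth 40000 in
theorem flatMap_map' {α β γ : Type} (l : List α) (f : α → β) (g : β → List γ) :
    (l.map f).flatMap g = l.flatMap (fun x => g (f x)) := by
  induction l with
  | nil => rfl
  | cons a t ih => simp [ih]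

theorem range256_split :
    List.range 256 = (List.range 16).flatMap (fun h => (List.range 16).map (fun l => 16*h+l)) := by
  decide

-- a filtered scan of all 256 bytes is a nested filtered scan over the two nibbles
theorem rangeSplit {α : Type} (p q : Nat → Bool) (g : Nat → Nat → α) :
    ((List.range 256).filter (fun b => p (b/16) && q (b%16))).map (fun b => g (b/16) (b%16))
    = ((List.range 16).filter p).flatMap (fun h => ((List.range 16).filter q).map (fun l => g h l)) := by
  rw [range256_split]
  rw [← flatMap_if (List.range 16) (fun h => ((List.range 16).filter q).map (fun l => g h l)) p]
  rw [List.filter_flatMap, List.map_flatMap]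
  apply List.flatMap_congr
  intro h hh
  have hh16 : h < 16 := List.mem_range.mp hh
  rw [List.filter_map, List.map_map]
  have hcong : ∀ l ∈ List.range 16,
      ((fun b => p (b/16) && q (b%16)) ∘ (fun l => 16*h+l)) l = (fun l => p h && q l) l := by
    intro l hl
    have : l < 16 := List.mem_range.mp hl
    have e1 : (16*h+l)/16 = h := by omega
    have e2 : (16*h+l)%16 = l := by omega
    simp [Function.comp, e1, e2]
  rw [List.filter_congr hcong]
  by_cases hp : p h
  · simp only [hp, Bool.true_and, if_pos]
    apply List.map_congr_left
    intro l hl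
    have hl16 : l < 16 := List.mem_range.mp (List.mem_of_mem_filter hl)
    have e1 : (16*h+l)/16 = h := by omega
    have e2 : (16*h+l)%16 = l := by omega
    simp [e1, e2]
  · simp [hp]

theorem filtAll : (List.range 16).filter (fun h => pOK '?' (hexDigitA h)) = List.range 16 := by decide
theorem mapRange : (List.range 16).map hexDigitA = hexChars := by decide
theorem hex_ne_q : ∀ c ∈ hexChars, c ≠ '?' := by
  intro c hc
  fin_cases hc <;> decide
theorem filtHex : ∀ c ∈ hexChars,
    (List.range 16).filter (fun h => pOK c (hexDigitA h)) = [hexChars.idxOf c]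
    ∧ hexDigitA (hexChars.idxOf c) = c := by
  intro c hc
  fin_cases hc <;> constructor <;> decide
theorem okNib_mem (c : Char) (h : okNib c) : c = '?' ∨ c ∈ hexChars := h

-- A's per-byte acceptance test, in terms of the first two token characters
theorem ok_eq (c0 c1 : Char) (rest : List Char) (token : String)
    (h : token.toList = c0 :: c1 :: rest) (byte : Nat) :
    ((List.range 2).foldl (fun ok (i : Nat) =>
        if ok then
          let tc := (PySem.Str.pyGet? token (i : Int)).getD '\x00'
          let hc := [hexDigitA (byte / 16), hexDigitA (byte % 16)].getD i ' '
          if tc ≠ '?' ∧ tc ≠ hc then false else true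
        else ok) true)
    = (pOK c0 (hexDigitA (byte / 16)) && pOK c1 (hexDigitA (byte % 16))) := by
  have h2 : List.range 2 = [0, 1] := rfl
  simp [h2, h, pOK]
  by_cases e0 : c0 = '?' <;> by_cases e1 : c1 = '?' <;>
    by_cases f0 : c0 = hexDigitA (byte / 16) <;> by_cases f1 : c1 = hexDigitA (byte % 16) <;>
    simp [e0, e1, f0, f1]

-- A's 256-byte loop, as a nested nibble scan
theorem possibilitiesA_eq (token : String) (c0 c1 : Char) (rest : List Char)
    (h : token.toList = c0 :: c1 :: rest) :
    possibilitiesA token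
    = ((List.range 16).filter (fun hh => pOK c0 (hexDigitA hh))).flatMap (fun hh =>
        ((List.range 16).filter (fun l => pOK c1 (hexDigitA l))).map
          (fun l => ['\\','x', hexDigitA hh, hexDigitA l])) := by
  have step1 : possibilitiesA token
      = ((List.range 256).filter (fun byte =>
            (List.range 2).foldl (fun ok (i : Nat) =>
              if ok then
                let tc := (PySem.Str.pyGet? token (i : Int)).getD '\x00'
                let hc := [hexDigitA (byte / 16), hexDigitA (byte % 16)].getD i ' '
                if tc ≠ '?' ∧ tc ≠ hc then false else true
              else ok) true)).map
          (fun byte => '\\' :: 'x' :: [hexDigitA (byte / 16), hexDigitA (byte % 16)]) := by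
    unfold possibilitiesA
    simpa using PySem.List.foldl_append_if (l := List.range 256) (acc := ([] : List (List Char)))
      (p := fun byte => (List.range 2).foldl (fun ok (i : Nat) =>
            if ok then
              let tc := (PySem.Str.pyGet? token (i : Int)).getD '\x00'
              let hc := [hexDigitA (byte / 16), hexDigitA (byte % 16)].getD i ' '
              if tc ≠ '?' ∧ tc ≠ hc then false else true
            else ok) true)
      (f := fun byte => '\\' :: 'x' :: [hexDigitA (byte / 16), hexDigitA (byte % 16)])
  rw [step1, List.filter_congr (fun b _ => ok_eq c0 c1 rest token h b)]
  exact rangeSplit (fun hh => pOK c0 (hexDigitA hh)) (fun l => pOK c1 (hexDigitA l))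
    (fun hh l => ['\\','x', hexDigitA hh, hexDigitA l])

-- the nested nibble scan is exactly B's four-way case analysis
theorem core (c0 c1 : Char) (h0 : okNib c0) (h1 : okNib c1) :
    ((List.range 16).filter (fun hh => pOK c0 (hexDigitA hh))).flatMap (fun hh =>
      ((List.range 16).filter (fun l => pOK c1 (hexDigitA l))).map
        (fun l => ['\\','x', hexDigitA hh, hexDigitA l]))
    = possibilitiesB c0 c1 := by
  unfold possibilitiesB
  rcases okNib_mem c0 h0 with e0 | m0
  · rcases okNib_mem c1 h1 with e1 | m1
    · subst e0 e1
      rw [if_pos (⟨rfl, rfl⟩ : ('?' : Char) = '?' ∧ ('?' : Char) = '?')]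
      rw [filtAll, ← mapRange, flatMap_map']
      simp only [List.map_map]
      rfl
    · have ne1 := hex_ne_q c1 m1
      subst e0
      rw [if_neg (by simp [ne1]), if_pos rfl, if_pos m1]
      rw [filtAll, (filtHex c1 m1).1]  -- one filter left after filtAll
      simp only [List.map_cons, List.map_nil]
      rw [(filtHex c1 m1).2]
      rw [← mapRange]
      simp [← List.map_eq_flatMap, Function.comp]
  · have ne0 := hex_ne_q c0 m0
    rw [(filtHex c0 m0).1]
    simp only [List.flatMap_cons, List.flatMap_nil, List.append_nil]
    rw [(filtHex c0 m0).2]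
    rcases okNib_mem c1 h1 with e1 | m1
    · subst e1
      rw [if_neg (by simp [ne0]), if_neg ne0, if_pos rfl, if_pos m0]
      rw [filtAll, ← mapRange, List.map_map]
      rfl
    · have ne1 := hex_ne_q c1 m1
      rw [(filtHex c1 m1).1]
      simp only [List.map_cons, List.map_nil]
      rw [(filtHex c1 m1).2]
      rw [if_neg (by simp [ne0]), if_neg ne0, if_neg ne1, if_pos ⟨m0, m1⟩]

-- ===== VERDICT (by name: the statement is the Claim_ definition above) =====
theorem nibble_to_regex_spec : Claim_equal_nibble_to_regex := by
  intro token _ hpre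
  unfold Spec_nibble_to_regex nibble_to_regex nibble_to_regex_alt
  by_cases h1 : token = "??"
  · simp [h1]
  · simp only [if_neg h1]
    by_cases hb : PySem.Str.isIn "?" token
    · simp only [hb, Bool.not_true, Bool.false_eq_true, if_false]
      have hp3 : 2 ≤ token.toList.length ∧ okNib (token.toList.getD 0 ' ')
          ∧ okNib (token.toList.getD 1 ' ') := by
        rcases hpre with h | h | h
        · exact absurd h h1
        · rw [h] at hb; exact absurd hb (by simp)
        · exact h
      obtain ⟨c0, c1, rest, e⟩ : ∃ c0 c1 rest, token.toList = c0 :: c1 :: rest := by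
        rcases htl : token.toList with _ | ⟨a, _ | ⟨b, t⟩⟩
        · rw [htl] at hp3; simp at hp3
        · rw [htl] at hp3; simp at hp3
        · exact ⟨a, b, t, rfl⟩
      have ok0 : okNib c0 := by have := hp3.2.1; rwa [e] at this
      have ok1 : okNib c1 := by have := hp3.2.2; rwa [e] at this
      have g0 : PySem.Str.pyGet? token (0 : Int) = some c0 := by
        simp [e, PySem.List.pyGet?, PySem.List.pyIdx?]
        all_goals (rw [if_pos (by positivity)]; simp)
      have g1 : PySem.Str.pyGet? token (1 : Int) = some c1 := by
        simp [e, PySem.List.pyGet?, PySem.List.pyIdx?]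
      have hposs : possibilitiesA token = possibilitiesB c0 c1 :=
        (possibilitiesA_eq token c0 c1 rest e).trans (core c0 c1 ok0 ok1)
      simp only [g0, g1, Option.getD_some, hposs]
    · rw [Bool.not_eq_true] at hb
      have hb' : PySem.Chars.isIn ['?'] token.toList = false := by
        simpa [PySem.Str.isIn] using hb
      simp [hb']
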